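-- pv_equiv track=rewrite | github.com/yassataiseer/competitive-programming | 2013-CCC/s2.py | solve
-- ===== SOURCE A (Python) =====
-- def solve(max_weight,car_weights):
--     answer = 0
--     current_weight = 0
--     counter = 0
--     for i in range(len(car_weights)):
--         if i ==0:
--             if sum(car_weights[i:i+4])>max_weight:
--                 break
--             else:
--                 answer+=4
--         else:
--             if sum(car_weights[i:i+4])>max_weight:
--                 break
--             else:
--                 answer+=1
--     return answer
-- ===== SOURCE B (Python) =====
-- def solve(max_weight, car_weights):
--     n = len(car_weights)
--     # prefix sums: P[k] = sum of first k weights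
--     P = [0]
--     for w in car_weights:
--         P.append(P[-1] + w)
--     # first index whose (clamped) 4-window exceeds the limit
--     f = n
--     for i in range(n):
--         if P[min(i + 4, n)] - P[i] > max_weight:
--             f = i
--             break
--     # closed-form count: 0 if the very first window fails, else 4 + (f - 1)
--     return 0 if f == 0 else f + 3
-- ===== Notes on version B (the rewrite author's own statement) =====
-- stated objective: alternative
-- what changed: Replaces the interleaved accumulate-and-break loop with repeated slice sums by a prefix-sum table, a search for the first failing 4-window, and a closed-form count 0 or f+3.
import Mathlib
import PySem

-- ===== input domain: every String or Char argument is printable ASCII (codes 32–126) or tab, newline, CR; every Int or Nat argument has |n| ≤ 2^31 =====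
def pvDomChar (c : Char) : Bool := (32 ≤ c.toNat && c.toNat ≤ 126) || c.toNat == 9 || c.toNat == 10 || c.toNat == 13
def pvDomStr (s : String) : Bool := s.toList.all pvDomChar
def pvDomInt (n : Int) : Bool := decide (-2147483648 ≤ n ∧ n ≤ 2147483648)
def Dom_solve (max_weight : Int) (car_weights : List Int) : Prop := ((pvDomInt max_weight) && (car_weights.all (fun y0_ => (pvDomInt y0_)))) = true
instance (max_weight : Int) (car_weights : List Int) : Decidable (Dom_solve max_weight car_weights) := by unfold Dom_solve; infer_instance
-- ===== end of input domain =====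

-- B replaces A's interleaved accumulate-and-break loop by a prefix-sum table, a
-- search for the first failing 4-window, and a closed-form count (alternative).

-- ===== PORT A =====
-- the for-loop with break: recursion over i, carrying 'answer'
def solveLoop (max_weight : Int) (car_weights : List Int) (i : Nat) (answer : Int) : Int :=
  if i < car_weights.length then
    if (PySem.List.slice car_weights (some (i : Int)) (some ((i : Int) + 4))).sum > max_weight then
      answer
    else
      solveLoop max_weight car_weights (i + 1) (answer + (if i == 0 then 4 else 1))
  else answer
termination_by car_weights.length - i

def solve (max_weight : Int) (car_weights : List Int) : Int :=
  solveLoop max_weight car_weights 0 0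

-- ===== PORT B =====
-- P = [0]; for w in car_weights: P.append(P[-1] + w)
def buildPrefix (car_weights : List Int) : List Int :=
  car_weights.foldl (fun P w => P ++ [P.getLastD 0 + w]) [0]

-- first i < n with P[min(i+4,n)] - P[i] > max_weight, else n
def findFail (max_weight : Int) (P : List Int) (n i : Nat) : Nat :=
  if i < n then
    if P.getD (min (i + 4) n) 0 - P.getD i 0 > max_weight then i
    else findFail max_weight P n (i + 1)
  else n
termination_by n - i

def solve_alt (max_weight : Int) (car_weights : List Int) : Int :=
  let n := car_weights.length
  let P := buildPrefix car_weights
  let f := findFail max_weight P n 0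
  if f = 0 then 0 else (f : Int) + 3

-- ===== PRECONDITION & SPEC =====
def Spec_solve (max_weight : Int) (car_weights : List Int) (out : Int) : Prop := out = solve_alt max_weight car_weights
instance (max_weight : Int) (car_weights : List Int) (out : Int) : Decidable (Spec_solve max_weight car_weights out) := by unfold Spec_solve; infer_instance

-- ===== CLAIM (what is proved, stated in full; the proofs are below) =====
def Claim_equal_solve : Prop := ∀ (max_weight : Int) (car_weights : List Int), Dom_solve max_weight car_weights → Spec_solve max_weight car_weights (solve max_weight car_weights)

-- ===== LEMMAS AND PROOFS =====

-- running-sum tail used to characterise buildPrefix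
def tailPrefix (s : Int) : List Int → List Int
  | [] => []
  | w :: ws => (s + w) :: tailPrefix (s + w) ws

lemma foldl_buildPrefix (cw : List Int) : ∀ (acc : List Int) (s : Int),
    acc ≠ [] → acc.getLastD 0 = s →
    cw.foldl (fun P w => P ++ [P.getLastD 0 + w]) acc = acc ++ tailPrefix s cw := by
  induction cw with
  | nil => intro acc s _ _; simp [tailPrefix]
  | cons w ws ih =>
    intro acc s hne hlast
    rw [List.foldl_cons, hlast,
      ih (acc ++ [s + w]) (s + w) (by simp) (by rw [List.getLastD_concat]), tailPrefix]
    simp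

lemma buildPrefix_eq (cw : List Int) : buildPrefix cw = 0 :: tailPrefix 0 cw := by
  rw [buildPrefix, foldl_buildPrefix cw [0] 0 (by simp) rfl]
  rfl

lemma tailPrefix_getD (ws : List Int) : ∀ (s : Int) (k : Nat), k < ws.length →
    (tailPrefix s ws).getD k 0 = s + (ws.take (k + 1)).sum := by
  induction ws with
  | nil => intro s k h; simp at h
  | cons w ws ih =>
    intro s k h
    cases k with
    | zero => simp [tailPrefix]
    | succ k =>
      simp only [tailPrefix, List.getD_cons_succ, List.take_succ_cons, List.sum_cons]
      rw [ih (s + w) k (by simpa using h)]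
      ring

lemma buildPrefix_getD (cw : List Int) (k : Nat) (hk : k ≤ cw.length) :
    (buildPrefix cw).getD k 0 = (cw.take k).sum := by
  rw [buildPrefix_eq]
  cases k with
  | zero => simp
  | succ k =>
    simp only [List.getD_cons_succ]
    rw [tailPrefix_getD cw 0 k (by omega)]
    simp

lemma take_min_length (cw : List Int) (m : Nat) :
    cw.take (min m cw.length) = cw.take m := by
  rcases le_total m cw.length with h | h
  · rw [Nat.min_eq_left h]
  · rw [Nat.min_eq_right h, List.take_of_length_le h, List.take_of_length_le (by omega)]

-- the loop's window sum equals B's prefix-sum difference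
lemma slice_sum (cw : List Int) (i : Nat) (hi : i ≤ cw.length) :
    (PySem.List.slice cw (some (i : Int)) (some ((i : Int) + 4))).sum =
      (buildPrefix cw).getD (min (i + 4) cw.length) 0 - (buildPrefix cw).getD i 0 := by
  have h4 : ((i : Int) + 4) = ((i : Int) + ((4 : Nat) : Int)) := by norm_num
  rw [h4, PySem.List.slice_natCast_add]
  rw [buildPrefix_getD cw (min (i + 4) cw.length) (by omega), buildPrefix_getD cw i hi]
  rw [take_min_length, List.take_add]
  simp

lemma findFail_ge (mw : Int) (P : List Int) (n : Nat) : ∀ i, i ≤ n → i ≤ findFail mw P n i := by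
  intro i
  induction i using findFail.induct mw P n with
  | case1 i h1 h2 => intro _; rw [findFail, if_pos h1, if_pos h2]
  | case2 i h1 h2 ih => intro _; rw [findFail, if_pos h1, if_neg h2]
                        have := ih (by omega); omega
  | case3 i h1 => intro h; rw [findFail, if_neg h1]; omega

lemma loop_eq (mw : Int) (cw : List Int) : ∀ i, 1 ≤ i → i ≤ cw.length → ∀ a,
    solveLoop mw cw i a = a + ((findFail mw (buildPrefix cw) cw.length i : Int) - (i : Int)) := by
  intro i
  induction i using findFail.induct mw (buildPrefix cw) cw.length with
  | case1 i h1 h2 =>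
    intro hi _ a
    have hf : findFail mw (buildPrefix cw) cw.length i = i := by
      rw [findFail, if_pos h1, if_pos h2]
    rw [solveLoop, if_pos h1, if_pos (by rw [slice_sum cw i (by omega)]; exact h2), hf]
    ring
  | case2 i h1 h2 ih =>
    intro hi _ a
    have hf : findFail mw (buildPrefix cw) cw.length i
        = findFail mw (buildPrefix cw) cw.length (i + 1) := by
      rw [findFail, if_pos h1, if_neg h2]
    have hi0 : (i == 0) = false := by simp; omega
    rw [solveLoop, if_pos h1, if_neg (by rw [slice_sum cw i (by omega)]; exact h2),
      hi0, if_neg Bool.false_ne_true, hf]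
    rcases Nat.lt_or_ge (i + 1) cw.length with h | h
    · rw [ih (by omega) (by omega)]; push_cast; ring
    · have hi1 : i + 1 = cw.length := by omega
      have hf2 : findFail mw (buildPrefix cw) cw.length (i + 1) = cw.length := by
        rw [findFail, if_neg (show ¬ i + 1 < cw.length by omega)]
      rw [solveLoop, if_neg (show ¬ i + 1 < cw.length by omega), hf2, ← hi1]
      push_cast; ring
  | case3 i h1 =>
    intro hi hle a
    have hf : findFail mw (buildPrefix cw) cw.length i = cw.length := by
      rw [findFail, if_neg h1]
    have hi1 : i = cw.length := by omega
    rw [solveLoop, if_neg h1, hf, hi1]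
    ring

-- ===== VERDICT (by name: the statement is the Claim_ definition above) =====
theorem solve_spec : Claim_equal_solve := by
  intro mw cw _
  simp only [Spec_solve, solve, solve_alt]
  by_cases hn : 0 < cw.length
  · by_cases hc : (buildPrefix cw).getD (min (0 + 4) cw.length) 0 - (buildPrefix cw).getD 0 0 > mw
    · have hf : findFail mw (buildPrefix cw) cw.length 0 = 0 := by
        rw [findFail, if_pos hn, if_pos hc]
      rw [solveLoop, if_pos hn, if_pos (by rw [slice_sum cw 0 (by omega)]; exact hc), hf,
        if_pos rfl]
    · have hf : findFail mw (buildPrefix cw) cw.length 0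
          = findFail mw (buildPrefix cw) cw.length (0 + 1) := by
        rw [findFail, if_pos hn, if_neg hc]
      have hge := findFail_ge mw (buildPrefix cw) cw.length (0 + 1) (by omega)
      have h00 : ((0 : Nat) == 0) = true := rfl
      rw [solveLoop, if_pos hn, if_neg (by rw [slice_sum cw 0 (by omega)]; exact hc),
        h00, if_pos rfl, loop_eq mw cw (0 + 1) (by omega) (by omega), hf,
        if_neg (show ¬ findFail mw (buildPrefix cw) cw.length (0 + 1) = 0 by omega)]
      push_cast; ring
  · have hf : findFail mw (buildPrefix cw) cw.length 0 = cw.length := by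
      rw [findFail, if_neg hn]
    rw [solveLoop, if_neg hn, hf, if_pos (by omega)]
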